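-- pv_equiv track=rewrite | github.com/7dsBot/EikthyrnirBot-f1f3 | Floors/FloorThree.py | _eventually_play_fourth_card
-- ===== SOURCE A (Python) =====
-- def _eventually_play_fourth_card(cards_to_play):
--     if len(cards_to_play) < 4:
--         cards_left = [i for i in range(1, 8)]
--         for index in cards_to_play:
--             try:
--                 cards_left.remove(index)
--             except ValueError:
--                 pass
--         cards_to_play.append(cards_left[0])
--
--     return cards_to_play
-- ===== SOURCE B (Python) =====
-- def _eventually_play_fourth_card(cards_to_play):
--     if len(cards_to_play) < 4:
--         for i in range(1, 8):
--             if i not in cards_to_play: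
--                 cards_to_play.append(i)
--                 break
--     return cards_to_play
-- ===== Notes on version B (the rewrite author's own statement) =====
-- stated objective: simpler
-- what changed: B scans 1..7 once and appends the first value absent from the list (early break), instead of materializing the complement list [1..7], removing every present card with try/remove, and indexing its head.
import Mathlib
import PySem

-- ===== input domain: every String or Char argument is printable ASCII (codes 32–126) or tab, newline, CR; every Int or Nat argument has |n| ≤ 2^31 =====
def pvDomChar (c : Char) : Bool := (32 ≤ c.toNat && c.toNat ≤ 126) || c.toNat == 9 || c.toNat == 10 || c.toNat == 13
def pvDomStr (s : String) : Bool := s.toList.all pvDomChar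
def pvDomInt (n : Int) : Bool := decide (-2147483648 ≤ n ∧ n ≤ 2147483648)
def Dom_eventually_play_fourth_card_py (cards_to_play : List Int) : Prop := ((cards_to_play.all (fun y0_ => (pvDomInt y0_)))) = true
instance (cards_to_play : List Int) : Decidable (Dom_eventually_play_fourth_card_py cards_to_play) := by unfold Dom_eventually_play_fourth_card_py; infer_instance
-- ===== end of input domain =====

-- B changes the algorithm: one scan over 1..7 appending the first absent value (early break),
-- instead of A's build-[1..7]/remove-each-card/take-head; objective: simpler. A mutates its
-- argument in place (append); the equivalence proved here is about the RETURN value.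

-- ===== PORT A =====
-- the loop body: cards_left.remove(index) with 'except ValueError: pass'
def pvRemoveStep (L : List Int) (index : Int) : List Int :=
  match PySem.List.remove? L index with
  | some L' => L'
  | none => L
def eventually_play_fourth_card_py (cards_to_play : List Int) : List Int :=
  if (cards_to_play.length : Int) < 4 then
    let cards_left := cards_to_play.foldl pvRemoveStep (PySem.List.pyRange 1 8 1)
    -- cards_left[0]: pyGet? none = IndexError; unreachable here (at most 3 values removed from 7)
    match PySem.List.pyGet? cards_left 0 with
    | some c => cards_to_play ++ [c]
    | none => cards_to_play
  else cards_to_play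

-- ===== PORT B =====
-- for i in range(1, 8): if i not in cards_to_play: append i; break
def pvScan (cards : List Int) : List Int → List Int
  | [] => cards
  | i :: rest => if i ∈ cards then pvScan cards rest else cards ++ [i]
def eventually_play_fourth_card_py_alt (cards_to_play : List Int) : List Int :=
  if (cards_to_play.length : Int) < 4 then
    pvScan cards_to_play (PySem.List.pyRange 1 8 1)
  else cards_to_play

-- ===== PRECONDITION & SPEC =====
def Spec_eventually_play_fourth_card_py (cards_to_play : List Int) (out : List Int) : Prop := out = eventually_play_fourth_card_py_alt cards_to_play
instance (cards_to_play : List Int) (out : List Int) : Decidable (Spec_eventually_play_fourth_card_py cards_to_play out) := by unfold Spec_eventually_play_fourth_card_py; infer_instance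

-- ===== CLAIM (what is proved, stated in full; the proofs are below) =====
def Claim_equal_eventually_play_fourth_card_py : Prop := ∀ (cards_to_play : List Int), Dom_eventually_play_fourth_card_py cards_to_play → Spec_eventually_play_fourth_card_py cards_to_play (eventually_play_fourth_card_py cards_to_play)

-- ===== LEMMAS AND PROOFS =====

-- one remove-with-pass step on a duplicate-free list is a filter
lemma pvRemoveStep_nodup {L : List Int} (h : L.Nodup) (c : Int) :
    pvRemoveStep L c = L.filter (fun x => decide (x ≠ c)) := by
  unfold pvRemoveStep
  by_cases hc : c ∈ L
  · rw [PySem.List.remove?_eq_some_erase L c hc]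
    simpa [bne] using h.erase_eq_filter c
  · rw [(PySem.List.remove?_eq_none_iff L c).2 hc]
    symm
    apply List.filter_eq_self.2
    intro x hx
    simp only [decide_eq_true_eq]
    rintro rfl; exact hc hx

-- A's whole removal loop on a duplicate-free list is a filter by non-membership
lemma fold_remove_filter : ∀ (cards L : List Int), L.Nodup →
    cards.foldl pvRemoveStep L = L.filter (fun x => !decide (x ∈ cards)) := by
  intro cards
  induction cards with
  | nil => intro L _; simp
  | cons c cs ih =>
      intro L hL
      simp only [List.foldl_cons]
      rw [pvRemoveStep_nodup hL c, ih _ (hL.filter _), List.filter_filter]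
      apply List.filter_congr
      intro x _
      simp [List.mem_cons, Bool.and_comm]

-- B's scan is find?-then-append
lemma pvScan_eq_find : ∀ (L cards : List Int),
    pvScan cards L = match L.find? (fun i => !decide (i ∈ cards)) with
      | some i => cards ++ [i]
      | none => cards := by
  intro L cards
  induction L with
  | nil => rfl
  | cons i rest ih =>
      by_cases hi : i ∈ cards
      · simpa [pvScan, List.find?, hi] using ih
      · simp [pvScan, List.find?, hi]

-- head of a filter is find?
lemma head?_filter_eq_find? : ∀ (L : List Int) (p : Int → Bool),
    (L.filter p).head? = L.find? p := by
  intro L p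
  induction L with
  | nil => rfl
  | cons x xs ih =>
      by_cases hx : p x = true
      · simp [List.find?, hx]
      · simp only [Bool.not_eq_true] at hx
        simp [List.find?, hx, ih]

-- ===== VERDICT (by name: the statement is the Claim_ definition above) =====
theorem eventually_play_fourth_card_py_spec : Claim_equal_eventually_play_fourth_card_py := by
  intro cards _
  unfold Spec_eventually_play_fourth_card_py eventually_play_fourth_card_py
    eventually_play_fourth_card_py_alt
  by_cases h : (cards.length : Int) < 4
  · simp only [h, if_true]
    rw [fold_remove_filter cards _ (by decide)]
    rw [pvScan_eq_find]
    rw [PySem.List.pyGet?_zero]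
    rw [← List.head?_eq_getElem?]
    rw [head?_filter_eq_find?]
  · simp [h]
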